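-- pv_equiv track=rewrite | github.com/pharelouindou/radar | plots.py | find_direct_conspiracy
-- ===== SOURCE A (Python) =====
-- def find_direct_conspiracy(conspiracies, close_friends, enemy):
--     potential_allies = []
--     for friend in close_friends:
--         if friend in conspiracies and enemy in conspiracies[friend]:
--             is_plotting_against_queen = "Cersei Lannister" in conspiracies.get(friend, [])
--             potential_allies.append((friend, is_plotting_against_queen))
--     if potential_allies:
--         potential_allies.sort(key=lambda x: (x[1], x[0]))
--         return [potential_allies[0][0], enemy]
--     return None
-- ===== SOURCE B (Python) =====
-- def find_direct_conspiracy(conspiracies, close_friends, enemy):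
--     best_clean = None      # alphabetically first qualifying friend NOT plotting against Cersei
--     best_plotting = None   # alphabetically first qualifying friend plotting against Cersei
--     for friend in close_friends:
--         plots = conspiracies.get(friend)
--         if plots is None or enemy not in plots:
--             continue
--         if "Cersei Lannister" in plots:
--             if best_plotting is None or friend < best_plotting:
--                 best_plotting = friend
--         else:
--             if best_clean is None or friend < best_clean:
--                 best_clean = friend
--     best = best_clean if best_clean is not None else best_plotting
--     if best is None:
--         return None
--     return [best, enemy]
-- ===== Notes on version B (the rewrite author's own statement) =====
-- stated objective: alternative
-- what changed: Replaces building a tuple list and sorting it by a (bool,name) key with a single streaming pass that tracks the alphabetical minimum of two priority buckets (not-plotting-against-Cersei first), returning the best directly.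
import Mathlib
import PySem

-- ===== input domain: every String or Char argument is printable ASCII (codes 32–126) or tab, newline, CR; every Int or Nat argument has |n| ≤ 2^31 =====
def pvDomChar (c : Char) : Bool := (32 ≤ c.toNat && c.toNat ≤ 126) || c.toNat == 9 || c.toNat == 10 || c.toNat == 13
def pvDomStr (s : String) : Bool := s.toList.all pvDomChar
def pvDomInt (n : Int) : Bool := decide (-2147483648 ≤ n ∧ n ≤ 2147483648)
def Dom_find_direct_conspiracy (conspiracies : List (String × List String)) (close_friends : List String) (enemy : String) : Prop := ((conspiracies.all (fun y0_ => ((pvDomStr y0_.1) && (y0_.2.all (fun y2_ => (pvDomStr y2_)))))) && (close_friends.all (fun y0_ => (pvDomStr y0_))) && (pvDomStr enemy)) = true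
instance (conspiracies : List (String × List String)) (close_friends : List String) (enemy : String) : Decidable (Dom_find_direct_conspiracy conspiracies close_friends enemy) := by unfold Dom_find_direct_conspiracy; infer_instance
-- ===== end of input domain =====

-- B replaces A's tuple-list build + sort by a (bool, name) key with one streaming pass that tracks
-- the alphabetical minimum of two priority buckets (non-Cersei-plotters first); alternative decomposition, same cost.
-- ===== PORT A =====
def find_direct_conspiracy (conspiracies : List (String × List String)) (close_friends : List String) (enemy : String) : Option (List String) :=
  let d : PySem.Dict String (List String) := PySem.Dict.mk conspiracies
  let potential_allies : List (String × Bool) :=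
    close_friends.foldl (fun acc friend =>
      if d.contains friend && decide (enemy ∈ (d.get? friend).getD []) then
        acc ++ [(friend, decide ("Cersei Lannister" ∈ d.getD friend []))]
      else acc) []
  if potential_allies ≠ [] then
    match PySem.List.sorted2 potential_allies (fun x => x.2) (fun x => x.1) with
    | (f, _) :: _ => some [f, enemy]
    | [] => none   -- unreachable: sorted2 of a nonempty list is nonempty
  else none

-- ===== PORT B =====
-- helper: keep the alphabetically smaller of the current best (if any) and a new candidate
def pvUpdMin (best : Option String) (f : String) : Option String :=
  match best with
  | none => some f
  | some b => if f < b then some f else some b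

def find_direct_conspiracy_alt (conspiracies : List (String × List String)) (close_friends : List String) (enemy : String) : Option (List String) :=
  let d : PySem.Dict String (List String) := PySem.Dict.mk conspiracies
  let st : Option String × Option String :=
    close_friends.foldl (fun st friend =>
      match d.get? friend with
      | none => st
      | some plots =>
        if enemy ∈ plots then
          if "Cersei Lannister" ∈ plots then (st.1, pvUpdMin st.2 friend)
          else (pvUpdMin st.1 friend, st.2)
        else st) (none, none)
  match st.1 with
  | some b => some [b, enemy]
  | none =>
    match st.2 with
    | some b => some [b, enemy]
    | none => none

-- ===== PRECONDITION & SPEC =====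
def Spec_find_direct_conspiracy (conspiracies : List (String × List String)) (close_friends : List String) (enemy : String) (out : Option (List String)) : Prop := out = find_direct_conspiracy_alt conspiracies close_friends enemy
instance (conspiracies : List (String × List String)) (close_friends : List String) (enemy : String) (out : Option (List String)) : Decidable (Spec_find_direct_conspiracy conspiracies close_friends enemy out) := by unfold Spec_find_direct_conspiracy; infer_instance

-- ===== CLAIM (what is proved, stated in full; the proofs are below) =====
def Claim_equal_find_direct_conspiracy : Prop := ∀ (conspiracies : List (String × List String)) (close_friends : List String) (enemy : String), Dom_find_direct_conspiracy conspiracies close_friends enemy → Spec_find_direct_conspiracy conspiracies close_friends enemy (find_direct_conspiracy conspiracies close_friends enemy)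

-- ===== LEMMAS AND PROOFS =====

-- abbreviations for the two tests both programs make (proof-side only)
def pvQual (d : PySem.Dict String (List String)) (enemy : String) (f : String) : Bool :=
  d.contains f && decide (enemy ∈ (d.get? f).getD [])

def pvPlot (d : PySem.Dict String (List String)) (f : String) : Bool :=
  decide ("Cersei Lannister" ∈ d.getD f [])

-- the lexicographic "strictly before" test sorted2 uses at our keys
def pvBefore (a b : String × Bool) : Bool :=
  decide (a.2 < b.2) || (!decide (b.2 < a.2) && decide (a.1 < b.1))

theorem pvBefore_irrefl (a : String × Bool) : pvBefore a a = false := by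
  simp [pvBefore]

theorem pvBefore_trans {a b c : String × Bool} (h1 : pvBefore a b = true) (h2 : pvBefore b c = true) : pvBefore a c = true := by
  simp only [pvBefore, Bool.or_eq_true, Bool.and_eq_true, Bool.not_eq_true', decide_eq_true_eq, decide_eq_false_iff_not] at *
  rcases h1 with h1 | ⟨h1a, h1b⟩ <;> rcases h2 with h2 | ⟨h2a, h2b⟩
  · exact Or.inl (lt_trans h1 h2)
  · exact Or.inl (lt_of_lt_of_le h1 (le_of_not_gt h2a))
  · exact Or.inl (lt_of_le_of_lt (le_of_not_gt h1a) h2)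
  · exact Or.inr ⟨fun h => h2a (lt_of_lt_of_le h (le_of_not_gt h1a)), lt_trans h1b h2b⟩

-- head of insertBy stays before-minimal
theorem insertBy_head_min (x : String × Bool) (acc : List (String × Bool))
    (h : ∀ m t, acc = m :: t → ∀ y ∈ acc, pvBefore y m = false) :
    ∀ m t, PySem.List.insertBy pvBefore x acc = m :: t → ∀ y ∈ PySem.List.insertBy pvBefore x acc, pvBefore y m = false := by
  cases acc with
  | nil =>
    intro m t hm y hy
    simp only [PySem.List.insertBy] at hm hy
    cases hm; simp only [List.mem_singleton] at hy
    subst hy; exact pvBefore_irrefl _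
  | cons hd tl =>
    intro m t hm y hy
    simp only [PySem.List.insertBy] at hm hy
    by_cases hx : pvBefore x hd = true
    · rw [if_pos hx] at hm hy
      cases hm
      rcases List.mem_cons.mp hy with rfl | hy'
      · exact pvBefore_irrefl _
      · by_contra hcon
        have hyx : pvBefore y x = true := by
          cases hb : pvBefore y x
          · exact absurd hb hcon
          · rfl
        have : pvBefore y hd = true := pvBefore_trans hyx hx
        have hfalse := h hd tl rfl y hy'
        rw [hfalse] at this; cases this
    · rw [if_neg hx] at hm hy
      have hm' : m = hd ∧ t = PySem.List.insertBy pvBefore x tl := by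
        cases hm; exact ⟨rfl, rfl⟩
      obtain ⟨rfl, rfl⟩ := hm'
      rcases List.mem_cons.mp hy with rfl | hy'
      · exact pvBefore_irrefl _
      · rcases (PySem.List.mem_insertBy pvBefore x y tl).mp hy' with rfl | hy''
        · simp only [Bool.not_eq_true] at hx; exact hx
        · exact h m tl rfl y (List.mem_cons_of_mem _ hy'')

theorem foldl_insertBy_head_min (xs : List (String × Bool)) (acc : List (String × Bool))
    (h : ∀ m t, acc = m :: t → ∀ y ∈ acc, pvBefore y m = false) :
    ∀ m t, xs.foldl (fun acc x => PySem.List.insertBy pvBefore x acc) acc = m :: t →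
      ∀ y ∈ xs.foldl (fun acc x => PySem.List.insertBy pvBefore x acc) acc, pvBefore y m = false := by
  induction xs generalizing acc with
  | nil => simpa using h
  | cons a xs ih =>
    simp only [List.foldl_cons]
    exact ih (PySem.List.insertBy pvBefore a acc) (insertBy_head_min a acc h)

-- the head of sorted2 is lexicographically minimal over the input
theorem sorted2_head_min (xs : List (String × Bool)) (m : String × Bool) (t : List (String × Bool))
    (h : PySem.List.sorted2 xs (fun x => x.2) (fun x => x.1) = m :: t) :
    ∀ y ∈ xs, pvBefore y m = false := by
  have hperm := PySem.List.sorted2_perm xs (fun x => x.2) (fun x => x.1) false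
  have hdef : PySem.List.sorted2 xs (fun x => x.2) (fun x => x.1) =
      xs.foldl (fun acc x => PySem.List.insertBy pvBefore x acc) [] := by
    simp only [PySem.List.sorted2]
    rfl
  rw [hdef] at h hperm
  intro y hy
  have hy' : y ∈ xs.foldl (fun acc x => PySem.List.insertBy pvBefore x acc) [] :=
    hperm.mem_iff.mpr hy
  exact foldl_insertBy_head_min xs [] (by intro m t hmt; cases hmt) m t h y hy'

-- running-min fold facts
theorem pvUpdMin_some (o : Option String) (x : String) : ∃ c, pvUpdMin o x = some c := by
  cases o with
  | none => exact ⟨x, rfl⟩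
  | some b => simp only [pvUpdMin]; split <;> exact ⟨_, rfl⟩

theorem foldl_pvUpdMin_some_ne_none (l : List String) (c : String) :
    l.foldl pvUpdMin (some c) ≠ none := by
  induction l generalizing c with
  | nil => simp
  | cons a l ih =>
    simp only [List.foldl_cons]
    obtain ⟨c', hc⟩ := pvUpdMin_some (some c) a
    rw [hc]; exact ih c'

theorem foldl_pvUpdMin_none_eq_none_iff (l : List String) :
    l.foldl pvUpdMin none = none ↔ l = [] := by
  cases l with
  | nil => simp
  | cons x l =>
    simp only [List.foldl_cons, pvUpdMin]
    constructor
    · intro h; exact absurd h (foldl_pvUpdMin_some_ne_none l x)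
    · intro h; cases h

theorem pvUpdMin_spec (o : Option String) (x c : String) (h : pvUpdMin o x = some c) :
    c ≤ x ∧ (c = x ∨ o = some c) ∧ (∀ b, o = some b → c ≤ b) := by
  cases o with
  | none =>
    simp only [pvUpdMin, Option.some.injEq] at h
    exact ⟨le_of_eq h.symm, Or.inl h.symm, fun b hb => by cases hb⟩
  | some b =>
    simp only [pvUpdMin] at h
    split at h <;> rename_i hlt <;> simp only [Option.some.injEq] at h <;> subst h
    · exact ⟨le_refl _, Or.inl rfl, fun b' hb' => by cases hb'; exact le_of_lt hlt⟩
    · exact ⟨le_of_not_gt hlt, Or.inr rfl, fun b' hb' => by cases hb'; exact le_refl _⟩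

theorem foldl_pvUpdMin_min (l : List String) (o : Option String) (m : String)
    (h : l.foldl pvUpdMin o = some m) :
    (m ∈ l ∨ o = some m) ∧ (∀ y ∈ l, m ≤ y) ∧ (∀ b, o = some b → m ≤ b) := by
  induction l generalizing o with
  | nil =>
    simp only [List.foldl_nil] at h
    exact ⟨Or.inr h, by simp, fun b hb => by rw [h] at hb; cases hb; exact le_refl _⟩
  | cons a l ih =>
    simp only [List.foldl_cons] at h
    obtain ⟨hmem, hall, hacc⟩ := ih (pvUpdMin o a) h
    obtain ⟨c, hc⟩ := pvUpdMin_some o a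
    obtain ⟨hcx, hcor, hcb⟩ := pvUpdMin_spec o a c hc
    have hmc : m ≤ c := hacc c hc
    refine ⟨?_, ?_, ?_⟩
    · rcases hmem with hm | hm
      · exact Or.inl (List.mem_cons_of_mem _ hm)
      · rw [hc] at hm; cases hm
        rcases hcor with h1 | h1
        · exact Or.inl (h1 ▸ List.mem_cons_self)
        · exact Or.inr h1
    · intro y hy
      rcases List.mem_cons.mp hy with rfl | hy
      · exact le_trans hmc hcx
      · exact hall y hy
    · intro b hb
      exact le_trans hmc (hcb b hb)

theorem pvB_step (d : PySem.Dict String (List String)) (enemy : String) (st : Option String × Option String) (f : String) :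
    (match d.get? f with
      | none => st
      | some plots =>
        if enemy ∈ plots then
          if "Cersei Lannister" ∈ plots then (st.1, pvUpdMin st.2 f)
          else (pvUpdMin st.1 f, st.2)
        else st)
    = (if pvQual d enemy f && !pvPlot d f then pvUpdMin st.1 f else st.1,
       if pvQual d enemy f && pvPlot d f then pvUpdMin st.2 f else st.2) := by
  cases hg : d.get? f with
  | none =>
    have hc : d.contains f = false := by rw [PySem.Dict.contains_eq_isSome_get?, hg]; rfl
    simp [pvQual, hc]
  | some plots =>
    have hc : d.contains f = true := by rw [PySem.Dict.contains_eq_isSome_get?, hg]; rfl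
    have hgd : d.getD f [] = plots := by
      rw [PySem.Dict.getD_eq_get?_getD, hg]; rfl
    by_cases he : enemy ∈ plots <;> by_cases hcer : "Cersei Lannister" ∈ plots <;>
      simp [pvQual, pvPlot, hc, hg, hgd, he, hcer]

theorem pvCore (d : PySem.Dict String (List String)) (cf : List String) (enemy : String) :
    (if cf.foldl (fun acc friend =>
        if d.contains friend && decide (enemy ∈ (d.get? friend).getD []) then
          acc ++ [(friend, decide ("Cersei Lannister" ∈ d.getD friend []))]
        else acc) ([] : List (String × Bool)) ≠ [] then
      match PySem.List.sorted2 (cf.foldl (fun acc friend =>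
        if d.contains friend && decide (enemy ∈ (d.get? friend).getD []) then
          acc ++ [(friend, decide ("Cersei Lannister" ∈ d.getD friend []))]
        else acc) ([] : List (String × Bool))) (fun x => x.2) (fun x => x.1) with
      | (f, _) :: _ => some [f, enemy]
      | [] => none
    else none)
    = (match (cf.foldl (fun st friend =>
        match d.get? friend with
        | none => st
        | some plots =>
          if enemy ∈ plots then
            if "Cersei Lannister" ∈ plots then (st.1, pvUpdMin st.2 friend)
            else (pvUpdMin st.1 friend, st.2)
          else st) ((none, none) : Option String × Option String)).1 with
      | some b => some [b, enemy]
      | none =>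
        match (cf.foldl (fun st friend =>
          match d.get? friend with
          | none => st
          | some plots =>
            if enemy ∈ plots then
              if "Cersei Lannister" ∈ plots then (st.1, pvUpdMin st.2 friend)
              else (pvUpdMin st.1 friend, st.2)
            else st) ((none, none) : Option String × Option String)).2 with
        | some b => some [b, enemy]
        | none => none) := by
  have hA : cf.foldl (fun acc friend =>
        if d.contains friend && decide (enemy ∈ (d.get? friend).getD []) then
          acc ++ [(friend, decide ("Cersei Lannister" ∈ d.getD friend []))]
        else acc) ([] : List (String × Bool))
      = (cf.filter (pvQual d enemy)).map (fun f => (f, pvPlot d f)) := by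
    have := PySem.List.foldl_append_if (l := cf) (acc := ([] : List (String × Bool)))
      (p := pvQual d enemy) (f := fun f => (f, pvPlot d f))
    simpa [pvQual, pvPlot] using this
  have hB : cf.foldl (fun st friend =>
        match d.get? friend with
        | none => st
        | some plots =>
          if enemy ∈ plots then
            if "Cersei Lannister" ∈ plots then (st.1, pvUpdMin st.2 friend)
            else (pvUpdMin st.1 friend, st.2)
          else st) ((none, none) : Option String × Option String)
      = ((cf.filter (fun f => pvQual d enemy f && !pvPlot d f)).foldl pvUpdMin none,
         (cf.filter (fun f => pvQual d enemy f && pvPlot d f)).foldl pvUpdMin none) := by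
    rw [PySem.List.foldl_congr_mem cf _
      (fun st f => (if pvQual d enemy f && !pvPlot d f then pvUpdMin st.1 f else st.1,
                    if pvQual d enemy f && pvPlot d f then pvUpdMin st.2 f else st.2))
      ((none, none) : Option String × Option String)
      (fun acc x _ => pvB_step d enemy acc x)]
    rw [PySem.List.foldl_prod_mk
      (f := fun a e => if pvQual d enemy e && !pvPlot d e then pvUpdMin a e else a)
      (g := fun a e => if pvQual d enemy e && pvPlot d e then pvUpdMin a e else a)]
    rw [PySem.List.foldl_if_eq_foldl_filter, PySem.List.foldl_if_eq_foldl_filter]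
  rw [hA, hB]
  by_cases hFe : cf.filter (pvQual d enemy) = []
  · have h0 : cf.filter (fun f => pvQual d enemy f && !pvPlot d f) = [] := by
      rw [List.filter_eq_nil_iff] at hFe ⊢
      intro a ha hq
      exact hFe a ha (Bool.and_elim_left hq)
    have h1 : cf.filter (fun f => pvQual d enemy f && pvPlot d f) = [] := by
      rw [List.filter_eq_nil_iff] at hFe ⊢
      intro a ha hq
      exact hFe a ha (Bool.and_elim_left hq)
    rw [hFe, h0, h1]
    simp
  · have hne : (cf.filter (pvQual d enemy)).map (fun f => (f, pvPlot d f)) ≠ [] := by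
      simpa using hFe
    rw [if_pos hne]
    cases hs : PySem.List.sorted2 ((cf.filter (pvQual d enemy)).map (fun f => (f, pvPlot d f))) (fun x => x.2) (fun x => x.1) with
    | nil =>
      exfalso
      have hperm := PySem.List.sorted2_perm ((cf.filter (pvQual d enemy)).map (fun f => (f, pvPlot d f))) (fun x => x.2) (fun x => x.1) false
      rw [hs] at hperm
      exact hne hperm.symm.eq_nil
    | cons m t =>
      obtain ⟨f0, b0⟩ := m
      have hmin := sorted2_head_min _ _ _ hs
      have hm_mem : (f0, b0) ∈ (cf.filter (pvQual d enemy)).map (fun f => (f, pvPlot d f)) := by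
        have hperm := PySem.List.sorted2_perm ((cf.filter (pvQual d enemy)).map (fun f => (f, pvPlot d f))) (fun x => x.2) (fun x => x.1) false
        rw [hs] at hperm
        exact hperm.mem_iff.mp List.mem_cons_self
      obtain ⟨f0', hf0', hEq⟩ := List.mem_map.mp hm_mem
      have hf0cf : f0 ∈ cf := (List.mem_filter.mp (by rw [(Prod.mk.injEq _ _ _ _).mp hEq |>.1] at hf0'; exact hf0')).1
      have hq0 : pvQual d enemy f0 = true := (List.mem_filter.mp (by rw [(Prod.mk.injEq _ _ _ _).mp hEq |>.1] at hf0'; exact hf0')).2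
      have hb0 : b0 = pvPlot d f0 := by
        have h1 := (Prod.mk.injEq _ _ _ _).mp hEq
        rw [← h1.1]; exact h1.2.symm
      -- any qualifying friend yields a pair in the potential list
      have hpair : ∀ a, a ∈ cf → pvQual d enemy a = true →
          (a, pvPlot d a) ∈ (cf.filter (pvQual d enemy)).map (fun f => (f, pvPlot d f)) := by
        intro a ha hqa
        exact List.mem_map.mpr ⟨a, List.mem_filter.mpr ⟨ha, hqa⟩, rfl⟩
      cases hp0 : pvPlot d f0 with
      | false =>
        -- the clean bucket is nonempty and its minimum is f0
        have hf0mem : f0 ∈ cf.filter (fun f => pvQual d enemy f && !pvPlot d f) :=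
          List.mem_filter.mpr ⟨hf0cf, by rw [hq0, hp0]; rfl⟩
        cases hs1 : (cf.filter (fun f => pvQual d enemy f && !pvPlot d f)).foldl pvUpdMin none with
        | none =>
          exfalso
          rw [foldl_pvUpdMin_none_eq_none_iff] at hs1
          rw [hs1] at hf0mem
          cases hf0mem
        | some b =>
          obtain ⟨hbmem, hball, _⟩ := foldl_pvUpdMin_min _ none b hs1
          have hbmem' : b ∈ cf.filter (fun f => pvQual d enemy f && !pvPlot d f) := by
            rcases hbmem with h | h
            · exact h
            · cases h
          obtain ⟨hbcf, hbq⟩ := List.mem_filter.mp hbmem'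
          have hbq1 : pvQual d enemy b = true := Bool.and_elim_left hbq
          have hbp : pvPlot d b = false := by
            have := Bool.and_elim_right hbq
            simpa using this
          have hblem := hmin (b, pvPlot d b) (hpair b hbcf hbq1)
          rw [hbp, hb0, hp0] at hblem
          simp only [pvBefore] at hblem
          have hnlt : ¬ b < f0 := by
            simp only [Bool.or_eq_false_iff, Bool.and_eq_false_iff] at hblem
            rcases hblem.2 with h | h
            · simp at h
            · simpa using h
          have hle : b ≤ f0 := hball f0 hf0mem
          have : b = f0 := le_antisymm hle (le_of_not_gt hnlt)
          simp [this]
      | true =>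
        -- no clean candidate exists; the plotting bucket's minimum is f0
        have h0 : cf.filter (fun f => pvQual d enemy f && !pvPlot d f) = [] := by
          rw [List.filter_eq_nil_iff]
          intro a ha hqa
          have hqa1 : pvQual d enemy a = true := Bool.and_elim_left hqa
          have hpa : pvPlot d a = false := by
            have := Bool.and_elim_right hqa
            simpa using this
          have := hmin (a, pvPlot d a) (hpair a ha hqa1)
          rw [hpa, hb0, hp0] at this
          simp [pvBefore] at this
        rw [h0]
        have hf0mem : f0 ∈ cf.filter (fun f => pvQual d enemy f && pvPlot d f) :=
          List.mem_filter.mpr ⟨hf0cf, by rw [hq0, hp0]; rfl⟩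
        cases hs2 : (cf.filter (fun f => pvQual d enemy f && pvPlot d f)).foldl pvUpdMin none with
        | none =>
          exfalso
          rw [foldl_pvUpdMin_none_eq_none_iff] at hs2
          rw [hs2] at hf0mem
          cases hf0mem
        | some b =>
          obtain ⟨hbmem, hball, _⟩ := foldl_pvUpdMin_min _ none b hs2
          have hbmem' : b ∈ cf.filter (fun f => pvQual d enemy f && pvPlot d f) := by
            rcases hbmem with h | h
            · exact h
            · cases h
          obtain ⟨hbcf, hbq⟩ := List.mem_filter.mp hbmem'
          have hbq1 : pvQual d enemy b = true := Bool.and_elim_left hbq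
          have hbp : pvPlot d b = true := Bool.and_elim_right hbq
          have hblem := hmin (b, pvPlot d b) (hpair b hbcf hbq1)
          rw [hbp, hb0, hp0] at hblem
          simp only [pvBefore] at hblem
          have hnlt : ¬ b < f0 := by
            simp only [Bool.or_eq_false_iff, Bool.and_eq_false_iff] at hblem
            rcases hblem.2 with h | h
            · simp at h
            · simpa using h
          have hle : b ≤ f0 := hball f0 hf0mem
          have : b = f0 := le_antisymm hle (le_of_not_gt hnlt)
          simp [this]

-- ===== VERDICT (by name: the statement is the Claim_ definition above) =====
theorem find_direct_conspiracy_spec : Claim_equal_find_direct_conspiracy := by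
  intro conspiracies close_friends enemy _
  unfold Spec_find_direct_conspiracy find_direct_conspiracy find_direct_conspiracy_alt
  exact pvCore (PySem.Dict.mk conspiracies) close_friends enemy
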